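-- pv_equiv track=rewrite | github.com/israel12132/weissman-cybersecurity | src/threat_attribution.py | get_threat_actors_for_finding
-- ===== SOURCE A (Python) =====
-- PRODUCT_TO_APT: list[tuple[list[str], list[str]]] = [
--     (["microsoft", "windows", "office", "exchange", "azure"], ["APT29", "Lazarus", "Fancy Bear"]),
--     (["nginx", "apache", "openssl", "linux", "kernel"], ["Fancy Bear", "Lazarus", "Sandworm"]),
--     (["vmware", "vsphere", "esxi"], ["Sandworm", "APT29"]),
--     (["citrix", "adc", "netscaler"], ["APT29", "Fancy Bear"]),
--     (["fortinet", "fortios", "vpn"], ["Sandworm", "APT28"]),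
--     (["jenkins", "gitlab", "jira", "confluence"], ["Lazarus", "APT38"]),
--     (["wordpress", "drupal", "joomla"], ["Fancy Bear", "APT28"]),
--     (["php", "java", "node", "python"], ["Lazarus", "APT29"]),
-- ]
--
-- CRITICAL_DEFAULT_ACTORS = ["Lazarus", "Fancy Bear", "APT29"]
--
-- HIGH_DEFAULT_ACTORS = ["Fancy Bear", "APT28"]
--
-- MEDIUM_DEFAULT_ACTORS = ["APT28"]
--
-- def get_threat_actors_for_finding(
--     cve_id: str = "",
--     severity: str = "",
--     title: str = "",
--     affected_components: list[str] | None = None,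
--     description: str = "",
-- ) -> list[str]:
--     """
--     Return likely threat actors (APT attribution) for a finding.
--     Used when severity is Critical or High; included in PDF as "Likely Threat Actors".
--     """
--     severity = (severity or "medium").lower()
--     components = list(affected_components or [])
--     if isinstance(affected_components, str):
--         components = [affected_components]
--     text = " ".join([title or "", description or ""] + components).lower()
--     actors_set: set[str] = set()
--
--     for keywords, apt_list in PRODUCT_TO_APT:
--         if any(kw in text for kw in keywords):
--             actors_set.update(apt_list)
--
--     if severity == "critical":
--         actors_set.update(CRITICAL_DEFAULT_ACTORS)
--     elif severity == "high":
--         actors_set.update(HIGH_DEFAULT_ACTORS)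
--     elif severity == "medium":
--         actors_set.update(MEDIUM_DEFAULT_ACTORS)
--
--     # Return unique, ordered (by default lists first)
--     result = []
--     for name in CRITICAL_DEFAULT_ACTORS + HIGH_DEFAULT_ACTORS + MEDIUM_DEFAULT_ACTORS:
--         if name in actors_set and name not in result:
--             result.append(name)
--     for a in sorted(actors_set):
--         if a not in result:
--             result.append(a)
--     return result[:5]  # cap at 5
-- ===== SOURCE B (Python) =====
-- ACTOR_ORDER_AND_KEYWORDS = [
--     ("Lazarus", ["microsoft", "windows", "office", "exchange", "azure",
--                  "nginx", "apache", "openssl", "linux", "kernel",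
--                  "jenkins", "gitlab", "jira", "confluence",
--                  "php", "java", "node", "python"]),
--     ("Fancy Bear", ["microsoft", "windows", "office", "exchange", "azure",
--                     "nginx", "apache", "openssl", "linux", "kernel",
--                     "citrix", "adc", "netscaler",
--                     "wordpress", "drupal", "joomla"]),
--     ("APT29", ["microsoft", "windows", "office", "exchange", "azure",
--                "vmware", "vsphere", "esxi",
--                "citrix", "adc", "netscaler",
--                "php", "java", "node", "python"]),
--     ("APT28", ["fortinet", "fortios", "vpn",
--                "wordpress", "drupal", "joomla"]),
--     ("APT38", ["jenkins", "gitlab", "jira", "confluence"]),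
--     ("Sandworm", ["nginx", "apache", "openssl", "linux", "kernel",
--                   "vmware", "vsphere", "esxi",
--                   "fortinet", "fortios", "vpn"]),
-- ]
--
-- SEVERITY_DEFAULTS = {
--     "critical": ["Lazarus", "Fancy Bear", "APT29"],
--     "high": ["Fancy Bear", "APT28"],
--     "medium": ["APT28"],
-- }
--
--
-- def get_threat_actors_for_finding(
--     cve_id="",
--     severity="",
--     title="",
--     affected_components=None,
--     description="",
-- ):
--     sev = (severity or "medium").lower()
--     components = list(affected_components or [])
--     if isinstance(affected_components, str):
--         components = [affected_components]
--     text = " ".join([title or "", description or ""] + components).lower()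
--     defaults = SEVERITY_DEFAULTS.get(sev, [])
--     result = [name for name, kws in ACTOR_ORDER_AND_KEYWORDS
--               if name in defaults or any(kw in text for kw in kws)]
--     return result[:5]
-- ===== Notes on version B (the rewrite author's own statement) =====
-- stated objective: simpler
-- what changed: A builds a set via a keyword fold, then emits it with two ordering loops (a priority-prefix pass over the concatenated default lists plus a sorted-tail pass over the whole set); B instead filters one fixed actor table that is already in A's final output order (priority actors first, remaining actors alphabetical), testing each actor once against its merged keyword list and the severity defaults, then takes the first five.
import Mathlib
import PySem

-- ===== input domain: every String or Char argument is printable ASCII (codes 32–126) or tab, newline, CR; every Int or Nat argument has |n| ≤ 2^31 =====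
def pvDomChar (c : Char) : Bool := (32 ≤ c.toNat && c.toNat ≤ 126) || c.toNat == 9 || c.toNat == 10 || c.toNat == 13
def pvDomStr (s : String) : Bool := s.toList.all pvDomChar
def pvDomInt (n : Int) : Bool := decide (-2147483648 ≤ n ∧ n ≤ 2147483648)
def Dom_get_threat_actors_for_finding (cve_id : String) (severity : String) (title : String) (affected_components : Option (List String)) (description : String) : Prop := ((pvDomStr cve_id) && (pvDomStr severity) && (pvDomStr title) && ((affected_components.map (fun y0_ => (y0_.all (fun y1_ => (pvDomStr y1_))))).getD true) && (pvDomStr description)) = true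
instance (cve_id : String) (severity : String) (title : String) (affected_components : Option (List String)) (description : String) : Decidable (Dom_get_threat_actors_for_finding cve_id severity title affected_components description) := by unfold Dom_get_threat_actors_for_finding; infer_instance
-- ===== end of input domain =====

-- B replaces A's set-building fold plus the two ordering loops (priority prefix, then sorted
-- tail) by a single filter of a fixed actor table already in final output order; objective: simpler.

-- ===== PORT A =====
def PRODUCT_TO_APT : List (List String × List String) := [
  (["microsoft", "windows", "office", "exchange", "azure"], ["APT29", "Lazarus", "Fancy Bear"]),
  (["nginx", "apache", "openssl", "linux", "kernel"], ["Fancy Bear", "Lazarus", "Sandworm"]),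
  (["vmware", "vsphere", "esxi"], ["Sandworm", "APT29"]),
  (["citrix", "adc", "netscaler"], ["APT29", "Fancy Bear"]),
  (["fortinet", "fortios", "vpn"], ["Sandworm", "APT28"]),
  (["jenkins", "gitlab", "jira", "confluence"], ["Lazarus", "APT38"]),
  (["wordpress", "drupal", "joomla"], ["Fancy Bear", "APT28"]),
  (["php", "java", "node", "python"], ["Lazarus", "APT29"])]

def CRITICAL_DEFAULT_ACTORS : List String := ["Lazarus", "Fancy Bear", "APT29"]
def HIGH_DEFAULT_ACTORS : List String := ["Fancy Bear", "APT28"]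
def MEDIUM_DEFAULT_ACTORS : List String := ["APT28"]

-- 'title or ""' / 'description or ""' on a str is that string itself (truthy gives it back,
-- falsy IS ""), so both are ported as the plain variable; the isinstance(affected_components, str)
-- branch cannot fire under the type convention (Option (List String)) and is omitted.
def get_threat_actors_for_finding (cve_id : String) (severity : String) (title : String) (affected_components : Option (List String)) (description : String) : List String :=
  let sev := PySem.Str.lower (if severity == "" then "medium" else severity)
  let components := affected_components.getD []
  let text := PySem.Str.lower (PySem.Str.join " " ([title, description] ++ components))
  let actors := PRODUCT_TO_APT.foldl
    (fun s p => if p.1.any (fun kw => PySem.Str.isIn kw text) then PySem.Set.update s p.2 else s)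
    PySem.Set.empty
  let actors :=
    if sev == "critical" then PySem.Set.update actors CRITICAL_DEFAULT_ACTORS
    else if sev == "high" then PySem.Set.update actors HIGH_DEFAULT_ACTORS
    else if sev == "medium" then PySem.Set.update actors MEDIUM_DEFAULT_ACTORS
    else actors
  let result := (CRITICAL_DEFAULT_ACTORS ++ HIGH_DEFAULT_ACTORS ++ MEDIUM_DEFAULT_ACTORS).foldl
    (fun r name => if PySem.Set.contains actors name && !(r.contains name) then r ++ [name] else r) []
  -- sorted(actors_set): Python str '<' is '<' on .toList (PYSEM str-comparison rule)
  let result := (PySem.List.sorted actors (fun x => x.toList) false).foldl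
    (fun r a => if !(r.contains a) then r ++ [a] else r) result
  PySem.List.slice result none (some 5)

-- ===== PORT B =====
def ACTOR_ORDER_AND_KEYWORDS : List (String × List String) := [
  ("Lazarus", ["microsoft", "windows", "office", "exchange", "azure",
               "nginx", "apache", "openssl", "linux", "kernel",
               "jenkins", "gitlab", "jira", "confluence",
               "php", "java", "node", "python"]),
  ("Fancy Bear", ["microsoft", "windows", "office", "exchange", "azure",
                  "nginx", "apache", "openssl", "linux", "kernel",
                  "citrix", "adc", "netscaler",
                  "wordpress", "drupal", "joomla"]),
  ("APT29", ["microsoft", "windows", "office", "exchange", "azure",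
             "vmware", "vsphere", "esxi",
             "citrix", "adc", "netscaler",
             "php", "java", "node", "python"]),
  ("APT28", ["fortinet", "fortios", "vpn",
             "wordpress", "drupal", "joomla"]),
  ("APT38", ["jenkins", "gitlab", "jira", "confluence"]),
  ("Sandworm", ["nginx", "apache", "openssl", "linux", "kernel",
                "vmware", "vsphere", "esxi",
                "fortinet", "fortios", "vpn"])]

def SEVERITY_DEFAULTS : PySem.Dict String (List String) := PySem.Dict.ofList [
  ("critical", ["Lazarus", "Fancy Bear", "APT29"]),
  ("high", ["Fancy Bear", "APT28"]),
  ("medium", ["APT28"])]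

def get_threat_actors_for_finding_alt (cve_id : String) (severity : String) (title : String) (affected_components : Option (List String)) (description : String) : List String :=
  let sev := PySem.Str.lower (if severity == "" then "medium" else severity)
  let components := affected_components.getD []
  let text := PySem.Str.lower (PySem.Str.join " " ([title, description] ++ components))
  let defaults := PySem.Dict.getD SEVERITY_DEFAULTS sev []
  ((ACTOR_ORDER_AND_KEYWORDS.filter
      (fun p => defaults.contains p.1 || p.2.any (fun kw => PySem.Str.isIn kw text))).map
    Prod.fst).take 5

-- ===== PRECONDITION & SPEC =====
def Spec_get_threat_actors_for_finding (cve_id : String) (severity : String) (title : String) (affected_components : Option (List String)) (description : String) (out : List String) : Prop := out = get_threat_actors_for_finding_alt cve_id severity title affected_components description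
instance (cve_id : String) (severity : String) (title : String) (affected_components : Option (List String)) (description : String) (out : List String) : Decidable (Spec_get_threat_actors_for_finding cve_id severity title affected_components description out) := by unfold Spec_get_threat_actors_for_finding; infer_instance

-- ===== CLAIM (what is proved, stated in full; the proofs are below) =====
def Claim_equal_get_threat_actors_for_finding : Prop := ∀ (cve_id : String) (severity : String) (title : String) (affected_components : Option (List String)) (description : String), Dom_get_threat_actors_for_finding cve_id severity title affected_components description → Spec_get_threat_actors_for_finding cve_id severity title affected_components description (get_threat_actors_for_finding cve_id severity title affected_components description)

-- ===== LEMMAS AND PROOFS =====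

-- the eight keyword groups of PRODUCT_TO_APT, named for the proof
def KW0 : List String := ["microsoft", "windows", "office", "exchange", "azure"]
def KW1 : List String := ["nginx", "apache", "openssl", "linux", "kernel"]
def KW2 : List String := ["vmware", "vsphere", "esxi"]
def KW3 : List String := ["citrix", "adc", "netscaler"]
def KW4 : List String := ["fortinet", "fortios", "vpn"]
def KW5 : List String := ["jenkins", "gitlab", "jira", "confluence"]
def KW6 : List String := ["wordpress", "drupal", "joomla"]
def KW7 : List String := ["php", "java", "node", "python"]

-- A's keyword-fold as a function of the eight per-group match bits
def setOfBits (b0 b1 b2 b3 b4 b5 b6 b7 : Bool) : PySem.Set String :=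
  List.foldl (fun s p => if p.1 then PySem.Set.update s p.2 else s) PySem.Set.empty
    [(b0, ["APT29", "Lazarus", "Fancy Bear"]), (b1, ["Fancy Bear", "Lazarus", "Sandworm"]),
     (b2, ["Sandworm", "APT29"]), (b3, ["APT29", "Fancy Bear"]), (b4, ["Sandworm", "APT28"]),
     (b5, ["Lazarus", "APT38"]), (b6, ["Fancy Bear", "APT28"]), (b7, ["Lazarus", "APT29"])]

-- A's whole pipeline after severity resolution, over the match bits and the default list
def fA (b0 b1 b2 b3 b4 b5 b6 b7 : Bool) (dfl : List String) : List String :=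
  let actors := PySem.Set.update (setOfBits b0 b1 b2 b3 b4 b5 b6 b7) dfl
  let result := (CRITICAL_DEFAULT_ACTORS ++ HIGH_DEFAULT_ACTORS ++ MEDIUM_DEFAULT_ACTORS).foldl
    (fun r name => if PySem.Set.contains actors name && !(r.contains name) then r ++ [name] else r) []
  let result := (PySem.List.sorted actors (fun x => x.toList) false).foldl
    (fun r a => if !(r.contains a) then r ++ [a] else r) result
  PySem.List.slice result none (some 5)

-- B's whole pipeline over the six per-actor match bits and the default list
def fB (a0 a1 a2 a3 a4 a5 : Bool) (dfl : List String) : List String :=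
  ((([("Lazarus", a0), ("Fancy Bear", a1), ("APT29", a2), ("APT28", a3), ("APT38", a4),
      ("Sandworm", a5)]).filter (fun p => dfl.contains p.1 || p.2)).map Prod.fst).take 5

theorem pta_fold (f : String → Bool) :
    PRODUCT_TO_APT.foldl (fun s p => if p.1.any f then PySem.Set.update s p.2 else s) PySem.Set.empty
      = setOfBits (KW0.any f) (KW1.any f) (KW2.any f) (KW3.any f) (KW4.any f) (KW5.any f)
          (KW6.any f) (KW7.any f) := rfl

theorem bridge (dfl : List String) (f : String → Bool) (l : List (String × List String)) :
    (l.filter (fun p => dfl.contains p.1 || p.2.any f)).map Prod.fst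
      = ((l.map (fun p => (p.1, p.2.any f))).filter (fun p => dfl.contains p.1 || p.2)).map
          Prod.fst := by
  induction l with
  | nil => rfl
  | cons x xs ih =>
      simp only [List.map_cons, List.filter_cons]
      by_cases h : (dfl.contains x.1 || x.2.any f) = true
      · simp only [h, if_true, List.map_cons, ih]
      · simp only [Bool.not_eq_true] at h
        simp only [h, Bool.false_eq_true, if_false, ih]

theorem aok_map (f : String → Bool) :
    ACTOR_ORDER_AND_KEYWORDS.map (fun p => (p.1, p.2.any f))
      = [("Lazarus", List.any (KW0 ++ KW1 ++ KW5 ++ KW7) f),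
         ("Fancy Bear", List.any (KW0 ++ KW1 ++ KW3 ++ KW6) f),
         ("APT29", List.any (KW0 ++ KW2 ++ KW3 ++ KW7) f),
         ("APT28", List.any (KW4 ++ KW6) f),
         ("APT38", List.any KW5 f),
         ("Sandworm", List.any (KW1 ++ KW2 ++ KW4) f)] := rfl

theorem sd_crit : PySem.Dict.getD SEVERITY_DEFAULTS "critical" [] = CRITICAL_DEFAULT_ACTORS := by decide
theorem sd_high : PySem.Dict.getD SEVERITY_DEFAULTS "high" [] = HIGH_DEFAULT_ACTORS := by decide
theorem sd_med : PySem.Dict.getD SEVERITY_DEFAULTS "medium" [] = MEDIUM_DEFAULT_ACTORS := by decide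
theorem sd_lit : SEVERITY_DEFAULTS = PySem.Dict.mk [("critical", ["Lazarus", "Fancy Bear", "APT29"]), ("high", ["Fancy Bear", "APT28"]), ("medium", ["APT28"])] := by decide
theorem sd_other (sev : String) (h1 : ¬ sev = "critical") (h2 : ¬ sev = "high") (h3 : ¬ sev = "medium") :
    PySem.Dict.getD SEVERITY_DEFAULTS sev [] = [] := by
  simp [sd_lit, PySem.Dict.getD, PySem.Dict.get?, Ne.symm h1, Ne.symm h2, Ne.symm h3]

theorem key_crit : ∀ b0 b1 b2 b3 b4 b5 b6 b7 : Bool,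
    fA b0 b1 b2 b3 b4 b5 b6 b7 CRITICAL_DEFAULT_ACTORS
      = fB (b0 || b1 || b5 || b7) (b0 || b1 || b3 || b6) (b0 || b2 || b3 || b7) (b4 || b6) b5
          (b1 || b2 || b4) CRITICAL_DEFAULT_ACTORS := by decide

theorem key_high : ∀ b0 b1 b2 b3 b4 b5 b6 b7 : Bool,
    fA b0 b1 b2 b3 b4 b5 b6 b7 HIGH_DEFAULT_ACTORS
      = fB (b0 || b1 || b5 || b7) (b0 || b1 || b3 || b6) (b0 || b2 || b3 || b7) (b4 || b6) b5
          (b1 || b2 || b4) HIGH_DEFAULT_ACTORS := by decide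

theorem key_med : ∀ b0 b1 b2 b3 b4 b5 b6 b7 : Bool,
    fA b0 b1 b2 b3 b4 b5 b6 b7 MEDIUM_DEFAULT_ACTORS
      = fB (b0 || b1 || b5 || b7) (b0 || b1 || b3 || b6) (b0 || b2 || b3 || b7) (b4 || b6) b5
          (b1 || b2 || b4) MEDIUM_DEFAULT_ACTORS := by decide

theorem key_other : ∀ b0 b1 b2 b3 b4 b5 b6 b7 : Bool,
    fA b0 b1 b2 b3 b4 b5 b6 b7 []
      = fB (b0 || b1 || b5 || b7) (b0 || b1 || b3 || b6) (b0 || b2 || b3 || b7) (b4 || b6) b5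
          (b1 || b2 || b4) [] := by decide

theorem core_eq (text sev : String) :
    (let actors := PRODUCT_TO_APT.foldl
        (fun s p => if p.1.any (fun kw => PySem.Str.isIn kw text) then PySem.Set.update s p.2 else s)
        PySem.Set.empty
     let actors :=
       if sev == "critical" then PySem.Set.update actors CRITICAL_DEFAULT_ACTORS
       else if sev == "high" then PySem.Set.update actors HIGH_DEFAULT_ACTORS
       else if sev == "medium" then PySem.Set.update actors MEDIUM_DEFAULT_ACTORS
       else actors
     let result := (CRITICAL_DEFAULT_ACTORS ++ HIGH_DEFAULT_ACTORS ++ MEDIUM_DEFAULT_ACTORS).foldl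
       (fun r name => if PySem.Set.contains actors name && !(r.contains name) then r ++ [name] else r) []
     let result := (PySem.List.sorted actors (fun x => x.toList) false).foldl
       (fun r a => if !(r.contains a) then r ++ [a] else r) result
     PySem.List.slice result none (some 5))
    = (let defaults := PySem.Dict.getD SEVERITY_DEFAULTS sev []
       ((ACTOR_ORDER_AND_KEYWORDS.filter
           (fun p => defaults.contains p.1 || p.2.any (fun kw => PySem.Str.isIn kw text))).map
         Prod.fst).take 5) := by
  set f : String → Bool := fun kw => PySem.Str.isIn kw text with hf
  show (let actors := PRODUCT_TO_APT.foldl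
          (fun s p => if p.1.any f then PySem.Set.update s p.2 else s) PySem.Set.empty
        let actors :=
          if sev == "critical" then PySem.Set.update actors CRITICAL_DEFAULT_ACTORS
          else if sev == "high" then PySem.Set.update actors HIGH_DEFAULT_ACTORS
          else if sev == "medium" then PySem.Set.update actors MEDIUM_DEFAULT_ACTORS
          else actors
        let result := (CRITICAL_DEFAULT_ACTORS ++ HIGH_DEFAULT_ACTORS ++ MEDIUM_DEFAULT_ACTORS).foldl
          (fun r name => if PySem.Set.contains actors name && !(r.contains name) then r ++ [name] else r) []
        let result := (PySem.List.sorted actors (fun x => x.toList) false).foldl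
          (fun r a => if !(r.contains a) then r ++ [a] else r) result
        PySem.List.slice result none (some 5))
      = (((ACTOR_ORDER_AND_KEYWORDS.filter
            (fun p => (PySem.Dict.getD SEVERITY_DEFAULTS sev []).contains p.1 || p.2.any f)).map
          Prod.fst).take 5)
  simp only []
  rw [pta_fold f, bridge (PySem.Dict.getD SEVERITY_DEFAULTS sev []) f ACTOR_ORDER_AND_KEYWORDS,
      aok_map f]
  simp only [List.any_append]
  by_cases hc : sev = "critical"
  · subst hc
    rw [sd_crit]
    simp only [beq_self_eq_true, if_true]
    exact key_crit (KW0.any f) (KW1.any f) (KW2.any f) (KW3.any f) (KW4.any f) (KW5.any f)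
      (KW6.any f) (KW7.any f)
  · by_cases hh : sev = "high"
    · subst hh
      rw [sd_high]
      simp only [show (("high" : String) == "critical") = false from by decide,
        beq_self_eq_true, if_true, Bool.false_eq_true, if_false]
      exact key_high (KW0.any f) (KW1.any f) (KW2.any f) (KW3.any f) (KW4.any f) (KW5.any f)
        (KW6.any f) (KW7.any f)
    · by_cases hm : sev = "medium"
      · subst hm
        rw [sd_med]
        simp only [show (("medium" : String) == "critical") = false from by decide,
          show (("medium" : String) == "high") = false from by decide,
          beq_self_eq_true, if_true, Bool.false_eq_true, if_false]
        exact key_med (KW0.any f) (KW1.any f) (KW2.any f) (KW3.any f) (KW4.any f) (KW5.any f)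
          (KW6.any f) (KW7.any f)
      · rw [sd_other sev hc hh hm]
        simp only [beq_eq_false_iff_ne.mpr hc, beq_eq_false_iff_ne.mpr hh,
          beq_eq_false_iff_ne.mpr hm, Bool.false_eq_true, if_false]
        exact key_other (KW0.any f) (KW1.any f) (KW2.any f) (KW3.any f) (KW4.any f) (KW5.any f)
          (KW6.any f) (KW7.any f)

theorem get_threat_actors_for_finding_spec : Claim_equal_get_threat_actors_for_finding := by
  intro cve_id severity title affected_components description _hdom
  unfold Spec_get_threat_actors_for_finding
  unfold get_threat_actors_for_finding get_threat_actors_for_finding_alt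
  exact core_eq _ _
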